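-- pv_equiv track=rewrite | github.com/jichen3000/codes | python/leetcode/algorithm/backtracking/set_02_Rat_in_a_Maze.py | solve
-- ===== SOURCE A (Python) =====
-- def solve(maze):
--     n = len(maze)
--     dirs = [(0,1),(1,0)]
--     def next_moves(i,j):
--         results = []
--         for di, dj in dirs:
--             ni, nj = i + di, j + dj
--             if ni >= 0 and ni < n and nj >= 0 and nj < n and maze[ni][nj]==1:
--                 results += (ni,nj),
--         return results
--     def dfs(moves):
--         i, j= moves[-1]
--         if i == n-1 and j == n-1:
--             return moves
--         for ni, nj in next_moves(i,j):
--             result = dfs(moves+[(ni,nj)])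
--             if result: return result
--     return dfs([(0,0)])
-- ===== SOURCE B (Python) =====
-- def solve(maze):
--     n = len(maze)
--     if n == 0:
--         return None
--     def passable(i, j):
--         row = maze[i]
--         return j < len(row) and row[j] == 1
--     def build_row(i, below):
--         row = [False] * n
--         for j in range(n - 1, -1, -1):
--             if i == n - 1 and j == n - 1:
--                 row[j] = True
--             else:
--                 row[j] = ((j + 1 < n and passable(i, j + 1) and row[j + 1]) or
--                           (i + 1 < n and passable(i + 1, j) and below[j]))
--         return row
--     rows = []
--     reach = [False] * n
--     for i in range(n - 1, -1, -1):
--         reach = build_row(i, reach)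
--         rows.insert(0, reach)
--     if not rows[0][0]:
--         return None
--     path = [(0, 0)]
--     i = j = 0
--     while (i, j) != (n - 1, n - 1):
--         if j + 1 < n and passable(i, j + 1) and rows[i][j + 1]:
--             j += 1
--         else:
--             i += 1
--         path.append((i, j))
--     return path
-- ===== Notes on version B (the rewrite author's own statement) =====
-- stated objective: alternative
-- what changed: Replaces the backtracking DFS over move prefixes with a bottom-up reachability table (DP) followed by a greedy right-first path reconstruction that returns the same right-preferring path.
-- outside the precondition, e.g. on solve([[0, 0, 0], [0, 0, 0], [0, 1]]): A returns None, B returns None; on solve([[0, 1], [0]]): A raises IndexError, B returns None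
import Mathlib
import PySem

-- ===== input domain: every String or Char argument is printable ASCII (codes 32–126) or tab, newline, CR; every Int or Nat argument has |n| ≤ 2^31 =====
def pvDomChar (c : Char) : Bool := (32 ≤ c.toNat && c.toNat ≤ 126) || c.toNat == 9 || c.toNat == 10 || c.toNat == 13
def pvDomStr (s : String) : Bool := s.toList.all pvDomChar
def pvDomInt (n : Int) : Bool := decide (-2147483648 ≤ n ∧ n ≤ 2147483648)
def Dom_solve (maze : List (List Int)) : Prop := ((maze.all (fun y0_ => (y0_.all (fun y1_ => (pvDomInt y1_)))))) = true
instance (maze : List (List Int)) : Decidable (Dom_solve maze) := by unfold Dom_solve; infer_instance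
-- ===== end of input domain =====

-- B replaces A's backtracking DFS over move prefixes by a bottom-up reachability table
-- plus a greedy right-first reconstruction that yields the same path (objective: alternative).

-- shared helper: maze[i][j] as an Option (Python raises on a missing cell; excluded by Pre_)
def pvCell (maze : List (List Int)) (i j : Int) : Option Int :=
  (PySem.List.pyGet? maze i).bind (fun row => PySem.List.pyGet? row j)

-- ===== PORT A =====
-- next_moves: loop over dirs = [(0,1),(1,0)]
def nextMoves (n : Int) (maze : List (List Int)) (i j : Int) : List (Int × Int) :=
  [((0:Int),(1:Int)), ((1:Int),(0:Int))].foldl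
    (fun results d =>
      let ni := i + d.1
      let nj := j + d.2
      if 0 ≤ ni ∧ ni < n ∧ 0 ≤ nj ∧ nj < n ∧ pvCell maze ni nj = some 1
      then results ++ [(ni, nj)] else results) []

-- dfs: fuel only makes the recursion structural; 2n fuel is provably enough (see proofs)
def dfs (n : Int) (maze : List (List Int)) (fuel : Nat) (moves : List (Int × Int)) :
    Option (List (Int × Int)) :=
  match PySem.List.pyGet? moves (-1) with
  | none => none
  | some (i, j) =>
    if i = n - 1 ∧ j = n - 1 then some moves
    else
      match fuel with
      | 0 => none
      | fuel + 1 =>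
        (nextMoves n maze i j).foldl
          (fun acc p =>
            match acc with
            | some r => some r
            | none => dfs n maze fuel (moves ++ [p]))
          none

def solve (maze : List (List Int)) : Option (List (Int × Int)) :=
  dfs maze.length maze (2 * maze.length) [((0:Int),(0:Int))]

-- ===== PORT B =====
-- passable(i,j): the cell exists in its row and equals 1 (only called with 0 <= i < n)
def passable (maze : List (List Int)) (i j : Int) : Bool :=
  match PySem.List.pyGet? maze i with
  | none => false
  | some row => decide (j < (row.length : Int)) && (PySem.List.pyGet? row j == some 1)

-- build_row's j-descending loop, rendered as recursion from the right: entries j..n-1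
def rowFrom (n : Int) (maze : List (List Int)) (i : Int) (below : List Bool) (j : Int) :
    List Bool :=
  if h : 0 ≤ j ∧ j < n then
    let rest := rowFrom n maze i below (j + 1)
    let v : Bool :=
      if i = n - 1 ∧ j = n - 1 then true
      else
        (decide (j + 1 < n) && passable maze i (j+1) && rest.headD false)
        || (decide (i + 1 < n) && passable maze (i+1) j
             && ((PySem.List.pyGet? below j).getD false))
    v :: rest
  else []
termination_by (n - j).toNat
decreasing_by omega

-- the i-descending loop building rows (each prepended); initial below = [False]*n
def rowsFrom (n : Int) (maze : List (List Int)) (i : Int) : List (List Bool) :=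
  if h : 0 ≤ i ∧ i < n then
    let rest := rowsFrom n maze (i + 1)
    let below := rest.headD (List.replicate n.toNat false)
    rowFrom n maze i below 0 :: rest
  else []
termination_by (n - i).toNat
decreasing_by omega

def rget (rows : List (List Bool)) (i j : Int) : Bool :=
  ((PySem.List.pyGet? rows i).bind (fun r => PySem.List.pyGet? r j)).getD false

-- the while loop; fuel only makes it structural, 2n is provably enough
def walk (n : Int) (maze : List (List Int)) (rows : List (List Bool)) :
    Nat → Int → Int → List (Int × Int) → List (Int × Int)
  | fuel, i, j, path =>
    if i = n - 1 ∧ j = n - 1 then path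
    else
      match fuel with
      | 0 => path
      | fuel + 1 =>
        if j + 1 < n ∧ passable maze i (j+1) = true ∧ rget rows i (j+1) = true
        then walk n maze rows fuel i (j + 1) (path ++ [(i, j + 1)])
        else walk n maze rows fuel (i + 1) j (path ++ [(i + 1, j)])

def solve_alt (maze : List (List Int)) : Option (List (Int × Int)) :=
  let n : Int := maze.length
  if n = 0 then none
  else
    let rows := rowsFrom n maze 0
    if rget rows 0 0 = false then none
    else some (walk n maze rows (2 * maze.length) 0 0 [((0:Int),(0:Int))])

-- ===== PRECONDITION & SPEC =====
-- Pre_ excludes mazes on which the search could index a short row past its end and Python A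
-- could raise IndexError: it requires the start cell and every in-bounds cell equal to 1 to
-- have their in-bounds right/down neighbour entries present (a slight over-approximation of
-- the cells the search visits, so it also excludes some ragged mazes on which A returns).
def Pre_solve (maze : List (List Int)) : Prop :=
  ∀ i < maze.length, ∀ j < maze.length,
    ((i = 0 ∧ j = 0) ∨ (maze.getD i [])[j]? = some 1) →
    (j + 1 < maze.length → j + 1 < (maze.getD i []).length) ∧
    (i + 1 < maze.length → j < (maze.getD (i + 1) []).length)
instance (maze : List (List Int)) : Decidable (Pre_solve maze) := by
  unfold Pre_solve; infer_instance

def pvWitness_solve : List (List Int) := [[1, 1], [0, 1]]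

def Spec_solve (maze : List (List Int)) (out : Option (List (Int × Int))) : Prop :=
  out = solve_alt maze
instance (maze : List (List Int)) (out : Option (List (Int × Int))) :
    Decidable (Spec_solve maze out) := by unfold Spec_solve; infer_instance

-- ===== CLAIM (what is proved, stated in full; the proofs are below) =====
def Claim_equal_solve : Prop :=
  ∀ (maze : List (List Int)), Dom_solve maze → Pre_solve maze → Spec_solve maze (solve maze)

-- ===== LEMMAS AND PROOFS =====

-- the greedy (right-first) suffix path from (i,j): the common semantics of both ports
def G (n : Int) (maze : List (List Int)) (i j : Int) : Option (List (Int × Int)) :=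
  if h : 0 ≤ i ∧ i < n ∧ 0 ≤ j ∧ j < n then
    if i = n - 1 ∧ j = n - 1 then some []
    else
      match (if j + 1 < n ∧ pvCell maze i (j+1) = some 1 then G n maze i (j+1) else none) with
      | some t => some ((i, j + 1) :: t)
      | none =>
        match (if i + 1 < n ∧ pvCell maze (i+1) j = some 1 then G n maze (i+1) j else none) with
        | some t => some ((i + 1, j) :: t)
        | none => none
  else none
termination_by (2 * n - i - j).toNat
decreasing_by all_goals omega

theorem nextMoves_eq (n : Int) (maze : List (List Int)) (i j : Int) :
    nextMoves n maze i j =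
      (if 0 ≤ i ∧ i < n ∧ 0 ≤ j + 1 ∧ j + 1 < n ∧ pvCell maze i (j+1) = some 1
        then [(i, j+1)] else [])
      ++ (if 0 ≤ i + 1 ∧ i + 1 < n ∧ 0 ≤ j ∧ j < n ∧ pvCell maze (i+1) j = some 1
        then [(i+1, j)] else []) := by
  simp [nextMoves]
  split_ifs <;> simp

theorem dfs_eq_G (n : Int) (maze : List (List Int)) :
    ∀ (fuel : Nat) (i j : Int) (moves : List (Int × Int)),
      0 ≤ i → i < n → 0 ≤ j → j < n → (2 * n - i - j).toNat ≤ fuel →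
      PySem.List.pyGet? moves (-1) = some (i, j) →
      dfs n maze fuel moves = (G n maze i j).map (fun t => moves ++ t) := by
  intro fuel
  induction fuel with
  | zero => intro i j moves hi0 hin hj0 hjn hf hl; exfalso; omega
  | succ fuel ih =>
    intro i j moves hi0 hin hj0 hjn hf hl
    rw [dfs, hl]
    by_cases hgoal : i = n - 1 ∧ j = n - 1
    · rw [G]
      simp [hgoal, hi0, hin, hj0, hjn]; omega
    · rw [G]
      simp only [dif_pos (show 0 ≤ i ∧ i < n ∧ 0 ≤ j ∧ j < n from ⟨hi0, hin, hj0, hjn⟩),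
        if_neg hgoal]
      rw [nextMoves_eq]
      by_cases hr : j + 1 < n ∧ pvCell maze i (j + 1) = some 1
      · have hlr : PySem.List.pyGet? (moves ++ [(i, j + 1)]) (-1) = some (i, j + 1) :=
          PySem.List.pyGet?_neg_one_append_singleton _ _
        have ihr := ih i (j + 1) (moves ++ [(i, j + 1)]) hi0 hin (by omega) hr.1 (by omega) hlr
        rw [if_pos ⟨hi0, hin, by omega, hr.1, hr.2⟩, if_pos hr]
        cases hGr : G n maze i (j + 1) with
        | some t =>
          simp only [hGr] at ihr
          by_cases hd : i + 1 < n ∧ pvCell maze (i + 1) j = some 1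
          · rw [if_pos ⟨by omega, hd.1, hj0, hjn, hd.2⟩]
            simp [ihr, hGr, List.append_assoc]
          · rw [if_neg (by intro hc; exact hd ⟨hc.2.1, hc.2.2.2.2⟩)]
            simp [ihr, hGr, List.append_assoc]
        | none =>
          simp only [hGr, Option.map_none] at ihr
          by_cases hd : i + 1 < n ∧ pvCell maze (i + 1) j = some 1
          · have hld : PySem.List.pyGet? (moves ++ [(i + 1, j)]) (-1) = some (i + 1, j) :=
              PySem.List.pyGet?_neg_one_append_singleton _ _
            have ihd := ih (i + 1) j (moves ++ [(i + 1, j)]) (by omega) hd.1 hj0 hjn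
              (by omega) hld
            rw [if_pos ⟨by omega, hd.1, hj0, hjn, hd.2⟩, if_pos hd]
            cases hGd : G n maze (i + 1) j with
            | some t => simp only [hGd] at ihd; simp [ihr, ihd, hGr, hGd, List.append_assoc]
            | none => simp only [hGd, Option.map_none] at ihd; simp [ihr, ihd, hGr, hGd]
          · rw [if_neg (by intro hc; exact hd ⟨hc.2.1, hc.2.2.2.2⟩), if_neg hd]
            simp [ihr, hGr]
      · rw [if_neg (by intro hc; exact hr ⟨hc.2.2.2.1, hc.2.2.2.2⟩), if_neg hr]
        by_cases hd : i + 1 < n ∧ pvCell maze (i + 1) j = some 1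
        · have hld : PySem.List.pyGet? (moves ++ [(i + 1, j)]) (-1) = some (i + 1, j) :=
            PySem.List.pyGet?_neg_one_append_singleton _ _
          have ihd := ih (i + 1) j (moves ++ [(i + 1, j)]) (by omega) hd.1 hj0 hjn
            (by omega) hld
          rw [if_pos ⟨by omega, hd.1, hj0, hjn, hd.2⟩, if_pos hd]
          cases hGd : G n maze (i + 1) j with
          | some t => simp only [hGd] at ihd; simp [ihd, hGd, List.append_assoc]
          | none => simp only [hGd, Option.map_none] at ihd; simp [ihd, hGd]
        · rw [if_neg (by intro hc; exact hd ⟨hc.2.1, hc.2.2.2.2⟩), if_neg hd]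
          simp

theorem G_isSome (n : Int) (maze : List (List Int)) (i j : Int)
    (hi0 : 0 ≤ i) (hin : i < n) (hj0 : 0 ≤ j) (hjn : j < n)
    (hgoal : ¬(i = n - 1 ∧ j = n - 1)) :
    (G n maze i j).isSome =
      ((decide (j + 1 < n) && decide (pvCell maze i (j+1) = some 1)
          && (G n maze i (j+1)).isSome)
       || (decide (i + 1 < n) && decide (pvCell maze (i+1) j = some 1)
          && (G n maze (i+1) j).isSome)) := by
  conv_lhs => rw [G]
  simp only [dif_pos (show 0 ≤ i ∧ i < n ∧ 0 ≤ j ∧ j < n from ⟨hi0, hin, hj0, hjn⟩),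
    if_neg hgoal]
  by_cases hr : j + 1 < n ∧ pvCell maze i (j + 1) = some 1
  · rw [if_pos hr]
    cases hGr : G n maze i (j + 1) with
    | some t => simp [hr.1, hr.2, hGr]
    | none =>
      by_cases hd : i + 1 < n ∧ pvCell maze (i + 1) j = some 1
      · rw [if_pos hd]
        cases hGd : G n maze (i + 1) j with
        | some t => simp [hd.1, hd.2, hGd]
        | none => simp [hGd]
      · rw [if_neg hd]
        simp only [Bool.or_eq_false_iff] at *
        by_cases h1 : i + 1 < n <;> by_cases h2 : pvCell maze (i + 1) j = some 1 <;>
          simp [h1, h2] at hd ⊢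
  · rw [if_neg hr]
    have hrf : (decide (j + 1 < n) && decide (pvCell maze i (j+1) = some 1)) = false := by
      by_cases h1 : j + 1 < n <;> by_cases h2 : pvCell maze i (j+1) = some 1 <;>
        simp [h1, h2] at hr ⊢ <;> tauto
    by_cases hd : i + 1 < n ∧ pvCell maze (i + 1) j = some 1
    · rw [if_pos hd]
      cases hGd : G n maze (i + 1) j with
      | some t => simp [hd.1, hd.2, hGd, hrf]
      | none => simp [hGd, hrf]
    · rw [if_neg hd]
      by_cases h1 : i + 1 < n <;> by_cases h2 : pvCell maze (i + 1) j = some 1 <;>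
        simp [h1, h2, hrf] at hd ⊢ <;> tauto

theorem passable_eq (maze : List (List Int)) (i j : Int) (hj : 0 ≤ j) :
    passable maze i j = decide (pvCell maze i j = some 1) := by
  rw [passable, pvCell]
  cases hrow : PySem.List.pyGet? maze i with
  | none => simp
  | some row =>
    cases h : PySem.List.pyGet? row j with
    | none => simp [h]
    | some v =>
      have hlen : j < (row.length : Int) := by
        rw [PySem.List.pyGet?_of_nonneg _ hj] at h
        have := (List.getElem?_eq_some_iff.mp h).1
        omega
      by_cases hv : v = 1 <;> simp [h, hlen, hv]

theorem rowFrom_eq (n : Int) (maze : List (List Int)) (i : Int) (below : List Bool)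
    (hi0 : 0 ≤ i) (hin : i < n)
    (hb : ∀ j', 0 ≤ j' → j' < n →
      (PySem.List.pyGet? below j').getD false = (G n maze (i+1) j').isSome) :
    ∀ (k : Nat) (j : Int), 0 ≤ j → (n - j).toNat ≤ k →
      rowFrom n maze i below j =
        (PySem.List.pyRange j n 1).map (fun j' => (G n maze i j').isSome) := by
  intro k
  induction k with
  | zero =>
    intro j hj0 hk
    rw [rowFrom, dif_neg (by omega), PySem.List.pyRange_one_eq_nil (by omega)]
    simp
  | succ k ih =>
    intro j hj0 hk
    by_cases hjn : j < n
    · rw [rowFrom, dif_pos ⟨hj0, hjn⟩, PySem.List.pyRange_one_cons hjn, List.map_cons]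
      have hrest := ih (j + 1) (by omega) (by omega)
      rw [hrest]
      have hv : (if i = n - 1 ∧ j = n - 1 then true
          else (decide (j + 1 < n) && passable maze i (j + 1) &&
                (((PySem.List.pyRange (j+1) n 1).map
                  (fun j' => (G n maze i j').isSome)).headD false))
            || (decide (i + 1 < n) && passable maze (i + 1) j &&
                ((PySem.List.pyGet? below j).getD false)))
          = (G n maze i j).isSome := by
        rw [passable_eq maze i (j+1) (by omega), passable_eq maze (i+1) j hj0]
        by_cases hgoal : i = n - 1 ∧ j = n - 1
        · rw [if_pos hgoal, G]
          simp [hi0, hin, hj0, hjn, hgoal]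
          omega
        · rw [if_neg hgoal, G_isSome n maze i j hi0 hin hj0 hjn hgoal]
          have hhead : ((PySem.List.pyRange (j+1) n 1).map
              (fun j' => (G n maze i j').isSome)).headD false
              = (decide (j + 1 < n) && (G n maze i (j+1)).isSome) := by
            by_cases hj1 : j + 1 < n
            · rw [PySem.List.pyRange_one_cons hj1]; simp [hj1]
            · rw [PySem.List.pyRange_one_eq_nil (by omega)]; simp [hj1]
          rw [hhead, hb j hj0 hjn]
          cases hc : decide (j + 1 < n) <;>
            cases hd : decide (pvCell maze i (j+1) = some 1) <;> simp
      exact congrArg (fun b => b :: (PySem.List.pyRange (j+1) n 1).map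
        (fun j' => (G n maze i j').isSome)) hv
    · rw [rowFrom, dif_neg (by omega), PySem.List.pyRange_one_eq_nil (by omega)]
      simp

theorem getD_pyGet? {α : Type} (xs : List α) (i : Int) (d : α) :
    (PySem.List.pyGet? xs i).getD d = PySem.List.pyGetD xs i d := rfl

theorem rowsFrom_eq (n : Int) (maze : List (List Int)) :
    ∀ (k : Nat) (i : Int), 0 ≤ i → (n - i).toNat ≤ k →
      rowsFrom n maze i =
        (PySem.List.pyRange i n 1).map
          (fun i' => (PySem.List.pyRange 0 n 1).map (fun j' => (G n maze i' j').isSome)) := by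
  intro k
  induction k with
  | zero =>
    intro i hi0 hk
    rw [rowsFrom, dif_neg (show ¬(0 ≤ i ∧ i < n) by omega),
      show PySem.List.pyRange i n 1 = [] from PySem.List.pyRange_one_eq_nil (by omega)]
    simp
  | succ k ih =>
    intro i hi0 hk
    by_cases hin : i < n
    · rw [rowsFrom, dif_pos ⟨hi0, hin⟩]
      have hrest := ih (i + 1) (by omega) (by omega)
      have hb : ∀ j', 0 ≤ j' → j' < n →
          (PySem.List.pyGet? ((rowsFrom n maze (i+1)).headD
            (List.replicate n.toNat false)) j').getD false
            = (G n maze (i+1) j').isSome := by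
        intro j' hj'0 hj'n
        by_cases hi1 : i + 1 < n
        · rw [hrest, PySem.List.pyRange_one_cons hi1, List.map_cons, List.headD_cons,
            getD_pyGet?,
            PySem.List.pyGetD_map_pyRange_of_nonneg _ n j' false hj'0 hj'n]
        · rw [hrest,
            show PySem.List.pyRange (i+1) n 1 = [] from PySem.List.pyRange_one_eq_nil (by omega),
            List.map_nil, List.headD_nil,
            PySem.List.pyGet?_of_nonneg _ hj'0, List.getElem?_replicate,
            if_pos (show j'.toNat < n.toNat by omega)]
          have hGnone : G n maze (i+1) j' = none := by
            rw [G, dif_neg (by omega)]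
          simp [hGnone]
      have hrow := rowFrom_eq n maze i _ hi0 hin hb n.toNat 0 le_rfl (by omega)
      rw [PySem.List.pyRange_one_cons hin, List.map_cons, ← hrest]
      exact congrArg₂ List.cons hrow rfl
    · rw [rowsFrom, dif_neg (show ¬(0 ≤ i ∧ i < n) by omega),
        show PySem.List.pyRange i n 1 = [] from PySem.List.pyRange_one_eq_nil (by omega)]
      simp

theorem rget_eq (n : Int) (maze : List (List Int)) (i j : Int)
    (hi0 : 0 ≤ i) (hin : i < n) (hj0 : 0 ≤ j) (hjn : j < n) :
    rget (rowsFrom n maze 0) i j = (G n maze i j).isSome := by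
  rw [rget, rowsFrom_eq n maze n.toNat 0 le_rfl (by omega)]
  rw [PySem.List.pyGet?_of_nonneg _ hi0, List.getElem?_map,
    PySem.List.getElem?_pyRange_one, if_pos (show i.toNat < (n - 0).toNat by omega)]
  simp only [Option.map_some]
  rw [show (0:Int) + (i.toNat:Int) = i by omega]
  rw [show (some ((PySem.List.pyRange 0 n 1).map
        (fun j' => (G n maze i j').isSome))).bind (fun r => PySem.List.pyGet? r j)
      = PySem.List.pyGet? ((PySem.List.pyRange 0 n 1).map
        (fun j' => (G n maze i j').isSome)) j from rfl]
  rw [getD_pyGet?, PySem.List.pyGetD_map_pyRange_of_nonneg _ n j false hj0 hjn]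

theorem walk_eq (n : Int) (maze : List (List Int)) (rows : List (List Bool))
    (hrows : ∀ i j, 0 ≤ i → i < n → 0 ≤ j → j < n →
      rget rows i j = (G n maze i j).isSome) :
    ∀ (fuel : Nat) (i j : Int) (path t : List (Int × Int)),
      0 ≤ i → i < n → 0 ≤ j → j < n → G n maze i j = some t →
      (2 * n - 2 - i - j).toNat ≤ fuel →
      walk n maze rows fuel i j path = path ++ t := by
  intro fuel
  induction fuel with
  | zero =>
    intro i j path t hi0 hin hj0 hjn hG hf
    have hgoal : i = n - 1 ∧ j = n - 1 := by omega
    rw [walk, if_pos hgoal]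
    rw [G, dif_pos (show 0 ≤ i ∧ i < n ∧ 0 ≤ j ∧ j < n from ⟨hi0, hin, hj0, hjn⟩),
      if_pos hgoal] at hG
    injection hG with ht
    rw [← ht]
    simp
  | succ fuel ih =>
    intro i j path t hi0 hin hj0 hjn hG hf
    by_cases hgoal : i = n - 1 ∧ j = n - 1
    · rw [walk, if_pos hgoal]
      rw [G, dif_pos (show 0 ≤ i ∧ i < n ∧ 0 ≤ j ∧ j < n from ⟨hi0, hin, hj0, hjn⟩),
        if_pos hgoal] at hG
      injection hG with ht
      rw [← ht]
      simp
    · rw [walk, if_neg hgoal]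
      rw [G, dif_pos (show 0 ≤ i ∧ i < n ∧ 0 ≤ j ∧ j < n from ⟨hi0, hin, hj0, hjn⟩),
        if_neg hgoal] at hG
      by_cases hr : j + 1 < n ∧ pvCell maze i (j + 1) = some 1
      · rw [if_pos hr] at hG
        cases hGr : G n maze i (j + 1) with
        | some t' =>
          simp only [hGr] at hG
          injection hG with ht; subst ht
          have hc : j + 1 < n ∧ passable maze i (j+1) = true ∧ rget rows i (j+1) = true := by
            refine ⟨hr.1, ?_, ?_⟩
            · rw [passable_eq maze i (j+1) (by omega)]
              exact decide_eq_true hr.2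
            · rw [hrows i (j+1) hi0 hin (by omega) hr.1, hGr]
              rfl
          rw [if_pos hc]
          rw [ih i (j+1) (path ++ [(i, j+1)]) t' hi0 hin (by omega) hr.1 hGr (by omega)]
          simp
        | none =>
          simp only [hGr] at hG
          have hnc : ¬(j + 1 < n ∧ passable maze i (j+1) = true
              ∧ rget rows i (j+1) = true) := by
            intro hc
            rw [hrows i (j+1) hi0 hin (by omega) hc.1, hGr] at hc
            exact absurd hc.2.2 (by simp)
          rw [if_neg hnc]
          by_cases hd : i + 1 < n ∧ pvCell maze (i+1) j = some 1
          · rw [if_pos hd] at hG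
            cases hGd : G n maze (i+1) j with
            | some t' =>
              simp only [hGd] at hG
              injection hG with ht; subst ht
              rw [ih (i+1) j (path ++ [(i+1, j)]) t' (by omega) hd.1 hj0 hjn hGd (by omega)]
              simp
            | none => simp only [hGd] at hG; exact absurd hG (by simp)
          · rw [if_neg hd] at hG; exact absurd hG (by simp)
      · rw [if_neg hr] at hG
        have hnc : ¬(j + 1 < n ∧ passable maze i (j+1) = true
            ∧ rget rows i (j+1) = true) := by
          intro hc
          refine hr ⟨hc.1, ?_⟩
          have := hc.2.1
          rw [passable_eq maze i (j+1) (by omega)] at this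
          exact of_decide_eq_true this
        rw [if_neg hnc]
        by_cases hd : i + 1 < n ∧ pvCell maze (i+1) j = some 1
        · rw [if_pos hd] at hG
          cases hGd : G n maze (i+1) j with
          | some t' =>
            simp only [hGd] at hG
            injection hG with ht; subst ht
            rw [ih (i+1) j (path ++ [(i+1, j)]) t' (by omega) hd.1 hj0 hjn hGd (by omega)]
            simp
          | none => simp only [hGd] at hG; exact absurd hG (by simp)
        · rw [if_neg hd] at hG; exact absurd hG (by simp)

-- ===== VERDICT (by name: the statement is the Claim_ definition above) =====
theorem solve_spec : Claim_equal_solve := by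
  intro maze hdom hpre
  show solve maze = solve_alt maze
  by_cases hn : maze.length = 0
  · have hmz : maze = [] := List.length_eq_zero_iff.mp hn
    subst hmz
    decide
  · have hn' : 0 < (maze.length : Int) := by omega
    have hlast : PySem.List.pyGet? [((0:Int),(0:Int))] (-1) = some (0, 0) := rfl
    have hA := dfs_eq_G (maze.length : Int) maze (2 * maze.length) 0 0
      [((0:Int),(0:Int))] le_rfl hn' le_rfl hn' (by omega) hlast
    have hrows : ∀ i j, 0 ≤ i → i < (maze.length : Int) → 0 ≤ j → j < (maze.length : Int) →
        rget (rowsFrom (maze.length : Int) maze 0) i j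
          = (G (maze.length : Int) maze i j).isSome :=
      fun i j a b c d => rget_eq (maze.length : Int) maze i j a b c d
    have h00 := hrows 0 0 le_rfl hn' le_rfl hn'
    rw [solve]
    show dfs (maze.length : Int) maze (2 * maze.length) [((0:Int),(0:Int))]
      = (if (maze.length : Int) = 0 then none
         else if rget (rowsFrom (maze.length : Int) maze 0) 0 0 = false then none
         else some (walk (maze.length : Int) maze (rowsFrom (maze.length : Int) maze 0)
            (2 * maze.length) 0 0 [((0:Int),(0:Int))]))
    rw [if_neg (show ¬((maze.length : Int) = 0) by omega)]
    cases hG : G (maze.length : Int) maze 0 0 with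
    | none =>
      rw [hA, hG]
      rw [hG] at h00
      simp only [Option.isSome_none] at h00
      rw [if_pos h00]
      rfl
    | some t =>
      rw [hA, hG]
      rw [hG] at h00
      simp only [Option.isSome_some] at h00
      rw [if_neg (by simp [h00])]
      rw [walk_eq (maze.length : Int) maze _ hrows (2 * maze.length) 0 0
        [((0:Int),(0:Int))] t le_rfl hn' le_rfl hn' hG (by omega)]
      rfl
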